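-- pv_equiv track=rewrite | github.com/nchanay/night-class | python labs/lab18-peaks_and_valleys.py | draw
-- ===== SOURCE A (Python) =====
-- def draw(data):
--     """
--     Draws a mountain out of the data
--     """
--     mountain = []
--     counter = max(data)
--     while counter > 0:
--         row = ['X' if i >= counter else ' ' for i in data]
--         mountain.append(''.join(row))
--         counter -= 1
--     return '\n'.join(mountain)
-- ===== SOURCE B (Python) =====
-- def draw(data):
--     m = max(data)
--     cols = [' ' * (m - max(0, v)) + 'X' * max(0, v) for v in data]
--     return '\n'.join(''.join(t) for t in zip(*cols))
-- ===== Notes on version B (the rewrite author's own statement) =====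
-- stated objective: alternative
-- what changed: B builds one column string per data point (spaces on top, X's below) and transposes with zip, instead of A's per-level while-loop scanning all of data once per height level; Pre_ excludes the empty list, on which max(data) raises ValueError in both.
import Mathlib
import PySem

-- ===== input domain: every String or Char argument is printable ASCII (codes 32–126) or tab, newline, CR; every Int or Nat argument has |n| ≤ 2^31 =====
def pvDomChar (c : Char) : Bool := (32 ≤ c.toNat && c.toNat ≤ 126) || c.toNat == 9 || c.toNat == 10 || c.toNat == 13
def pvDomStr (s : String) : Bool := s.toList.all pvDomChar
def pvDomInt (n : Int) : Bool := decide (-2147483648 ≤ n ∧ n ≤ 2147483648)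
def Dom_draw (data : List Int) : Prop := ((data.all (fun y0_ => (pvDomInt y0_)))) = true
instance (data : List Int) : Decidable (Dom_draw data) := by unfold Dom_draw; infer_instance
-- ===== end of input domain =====

-- B draws the mountain column by column and transposes, instead of A's per-level row loop; return values proved equal on nonempty data (both raise ValueError on []).

-- ===== PORT A =====
-- while counter > 0: mountain.append(''.join('X' if i >= counter else ' ' for i in data)); counter -= 1
def drawLoop (data : List Int) (counter : Int) (mountain : List String) : List String :=
  if counter > 0 then
    drawLoop data (counter - 1)
      (mountain ++ [String.mk (data.map (fun i => if i ≥ counter then 'X' else ' '))])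
  else mountain
termination_by counter.toNat
decreasing_by omega

def draw (data : List Int) : String :=
  match PySem.List.max? data (fun x => x) with
  | none => ""   -- Python: max([]) raises ValueError; excluded by Pre_draw
  | some counter => String.intercalate "\n" (drawLoop data counter [])

-- ===== PORT B =====
def draw_alt (data : List Int) : String :=
  match PySem.List.max? data (fun x => x) with
  | none => ""   -- Python: max([]) raises ValueError; excluded by Pre_draw
  | some m =>
    let cols : List (List Char) :=
      data.map (fun v => List.replicate (m - max 0 v).toNat ' ' ++ List.replicate (max 0 v).toNat 'X')
    -- zip(*cols) truncates to the shortest column (all columns have equal length here)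
    let n : Nat := ((cols.map List.length).min?).getD 0
    String.intercalate "\n" ((List.range n).map (fun i => String.mk (cols.map (fun c => c.getD i ' '))))

-- ===== PRECONDITION & SPEC =====
-- Pre_ excludes the empty list: max(data) raises ValueError there in both A and B.
def Pre_draw (data : List Int) : Prop := data ≠ []
instance (data : List Int) : Decidable (Pre_draw data) := by unfold Pre_draw; infer_instance
def pvWitness_draw : List Int := [2, 1, 3]

def Spec_draw (data : List Int) (out : String) : Prop := out = draw_alt data
instance (data : List Int) (out : String) : Decidable (Spec_draw data out) := by unfold Spec_draw; infer_instance

-- ===== CLAIM (what is proved, stated in full; the proofs are below) =====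
def Claim_equal_draw : Prop := ∀ (data : List Int), Dom_draw data → Pre_draw data → Spec_draw data (draw data)

-- ===== LEMMAS AND PROOFS =====

-- A's row at level k
def rowA (data : List Int) (k : Int) : String :=
  String.mk (data.map (fun v => if v ≥ k then 'X' else ' '))

lemma drawLoop_eq (data : List Int) :
    ∀ (n : Nat) (c : Int), c.toNat = n → ∀ (acc : List String),
      drawLoop data c acc = acc ++ (List.range n).map (fun (i : Nat) => rowA data (c - (i : Int))) := by
  intro n
  induction n with
  | zero =>
    intro c hc acc
    rw [drawLoop]
    simp only [List.range_zero, List.map_nil, List.append_nil]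
    have : ¬ c > 0 := by omega
    simp [this]
  | succ n ih =>
    intro c hc acc
    rw [drawLoop]
    have hcpos : c > 0 := by omega
    simp only [hcpos, if_pos]
    rw [ih (c - 1) (by omega)]
    rw [List.range_succ_eq_map, List.map_cons, List.map_map]
    simp only [List.append_assoc, List.singleton_append, Nat.cast_zero, sub_zero]
    congr 2
    apply List.map_congr_left
    intro i _
    simp only [Function.comp]
    congr 1
    push_cast
    ring

lemma col_len (m v : Int) (hv : v ≤ m) :
    (List.replicate (m - max 0 v).toNat ' ' ++ List.replicate (max 0 v).toNat 'X').length
      = m.toNat := by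
  simp only [List.length_append, List.length_replicate]
  omega

lemma min?_all_eq {l : List Nat} {k : Nat} (hne : l ≠ []) (h : ∀ x ∈ l, x = k) :
    l.min? = some k := by
  induction l with
  | nil => exact absurd rfl hne
  | cons a t ih =>
    cases t with
    | nil => simp [List.min?, h a (by simp)]
    | cons b u =>
      rw [List.min?_cons]
      rw [ih (by simp) (fun x hx => h x (List.mem_cons_of_mem _ hx))]
      simp [h a (by simp)]

lemma col_get (m v : Int) (i : Nat) (hv : v ≤ m) (hi : i < m.toNat) :
    (List.replicate (m - max 0 v).toNat ' ' ++ List.replicate (max 0 v).toNat 'X').getD i ' '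
      = if v ≥ m - (i : Int) then 'X' else ' ' := by
  simp only [List.getD_eq_getElem?_getD, List.getElem?_append, List.getElem?_replicate,
    List.length_replicate]
  split_ifs <;> simp_all <;> omega

theorem draw_eq_alt (data : List Int) (hne : data ≠ []) : draw data = draw_alt data := by
  obtain ⟨x, t, rfl⟩ := List.exists_cons_of_ne_nil hne
  rw [draw, draw_alt, PySem.List.max?_id_cons]
  set m : Int := t.foldl max x with hm
  have hmax : ∀ v ∈ (x :: t), v ≤ m := by
    intro v hv
    rcases List.mem_cons.mp hv with h | h
    · rw [h]; exact (PySem.List.le_foldl_max t x).1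
    · exact (PySem.List.le_foldl_max t x).2 v h
  simp only
  -- length of every column is m.toNat
  have hcols_len :
      (((x :: t).map (fun v => List.replicate (m - max 0 v).toNat ' ' ++ List.replicate (max 0 v).toNat 'X')).map List.length)
        = List.replicate (x :: t).length m.toNat := by
    rw [List.map_map, List.eq_replicate_iff]
    constructor
    · simp
    · intro y hy
      simp only [List.mem_map, Function.comp] at hy
      obtain ⟨v, hv, rfl⟩ := hy
      exact col_len m v (hmax v hv)
  have hn : ((((x :: t).map (fun v => List.replicate (m - max 0 v).toNat ' ' ++ List.replicate (max 0 v).toNat 'X')).map List.length).min?).getD 0 = m.toNat := by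
    rw [hcols_len, min?_all_eq (by simp) (fun y hy => (List.eq_of_mem_replicate hy))]
    rfl
  rw [hn, drawLoop_eq (x :: t) m.toNat m rfl []]
  simp only [List.nil_append]
  congr 1
  apply List.map_congr_left
  intro i hi
  have hi' : i < m.toNat := List.mem_range.mp hi
  rw [List.map_map]
  unfold rowA
  congr 1
  apply List.map_congr_left
  intro v hv
  simp only [Function.comp]
  rw [col_get m v i (hmax v hv) hi']

-- ===== VERDICT (by name: the statement is the Claim_ definition above) =====
theorem draw_spec : Claim_equal_draw := by
  intro data _ hpre
  exact draw_eq_alt data hpre
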